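-- pv_equiv track=rewrite | github.com/sabaimran/classify-articulate | typographical/generate_data.py | get_sentence_length_samples
-- ===== SOURCE A (Python) =====
-- from typing import List
--
-- def get_sentence_length_samples(base_sentences: List[str], target_length:int, target_count=60):
--     """Select negative and positive samples from the base sentences.
--
--     Logic:
--     - Parse through all base sentences. If the sentence length is less than or equal to target_length, it's a positive sample.
--     - If the sentence length is greater than target_length, it's a negative sample.
--     - Continue until we have target_count samples for both positive and negative.
--     """
--     negative_sentences = []
--     positive_sentences = []
--
--     for s in base_sentences:
--         if len(s.split()) <= target_length:
--             positive_sentences.append(s)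
--         else:
--             negative_sentences.append(s)
--         if len(negative_sentences) >= target_count and len(positive_sentences) >= target_count:
--             break
--
--     return negative_sentences[:target_count], positive_sentences[:target_count]
-- ===== SOURCE B (Python) =====
-- def get_sentence_length_samples(base_sentences, target_length, target_count=60):
--     positive_sentences = [s for s in base_sentences if len(s.split()) <= target_length][:target_count]
--     negative_sentences = [s for s in base_sentences if len(s.split()) > target_length][:target_count]
--     return negative_sentences, positive_sentences
-- ===== Notes on version B (the rewrite author's own statement) =====
-- stated objective: simpler
-- what changed: Replaces the single partitioning loop with its compound early-exit break by two independent filter-then-slice passes, one per bucket; Pre_ excludes negative target_count (outside the natural domain of a sample count), where negative-slice semantics make both results accidental.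
-- outside the precondition, e.g. on get_sentence_length_samples(['a', 'b', 'c'], 5, -1): A returns ([], []), B returns ([], ['a', 'b'])
import Mathlib
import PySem

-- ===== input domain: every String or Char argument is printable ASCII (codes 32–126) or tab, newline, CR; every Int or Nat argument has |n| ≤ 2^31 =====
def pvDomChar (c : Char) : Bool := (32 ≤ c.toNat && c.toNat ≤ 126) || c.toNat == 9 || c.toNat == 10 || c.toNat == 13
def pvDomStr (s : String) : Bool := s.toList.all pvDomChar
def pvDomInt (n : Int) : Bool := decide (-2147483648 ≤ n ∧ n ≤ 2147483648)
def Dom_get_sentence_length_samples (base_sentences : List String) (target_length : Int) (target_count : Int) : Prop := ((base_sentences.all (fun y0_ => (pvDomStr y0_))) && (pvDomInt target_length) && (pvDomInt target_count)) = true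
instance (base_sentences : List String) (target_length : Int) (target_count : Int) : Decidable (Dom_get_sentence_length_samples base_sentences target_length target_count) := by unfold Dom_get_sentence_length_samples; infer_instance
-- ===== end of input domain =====

-- B replaces A's single partitioning loop (with its compound early-exit break) by two
-- independent filter-then-slice passes, one per bucket (objective: simpler).

-- ===== PORT A =====
-- A's loop: append to one of the two accumulators, break once BOTH have ≥ target_count.
def pvLoopA (target_length target_count : Int) :
    List String → List String → List String → List String × List String
  | [], neg, pos => (neg, pos)
  | s :: rest, neg, pos =>
    let st :=
      if ((PySem.Str.split₀ s).length : Int) ≤ target_length then (neg, pos ++ [s])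
      else (neg ++ [s], pos)
    if target_count ≤ (st.1.length : Int) ∧ target_count ≤ (st.2.length : Int) then st
    else pvLoopA target_length target_count rest st.1 st.2

def get_sentence_length_samples (base_sentences : List String) (target_length : Int) (target_count : Int) : List String × List String :=
  let r := pvLoopA target_length target_count base_sentences [] []
  (PySem.List.slice r.1 none (some target_count), PySem.List.slice r.2 none (some target_count))

-- ===== PORT B =====
def get_sentence_length_samples_alt (base_sentences : List String) (target_length : Int) (target_count : Int) : List String × List String :=
  let positive_sentences := PySem.List.slice
    (base_sentences.filter (fun s => decide (((PySem.Str.split₀ s).length : Int) ≤ target_length)))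
    none (some target_count)
  let negative_sentences := PySem.List.slice
    (base_sentences.filter (fun s => decide (target_length < ((PySem.Str.split₀ s).length : Int))))
    none (some target_count)
  (negative_sentences, positive_sentences)

-- ===== PRECONDITION & SPEC =====
-- Pre_ excludes negative target_count, outside the natural domain of a sample count:
-- there Python's negative-slice semantics interact differently with A's early break and
-- with B's full scans, and neither resulting value is one anyone would specify.
def Pre_get_sentence_length_samples (base_sentences : List String) (target_length : Int) (target_count : Int) : Prop :=
  0 ≤ target_count
instance (base_sentences : List String) (target_length : Int) (target_count : Int) : Decidable (Pre_get_sentence_length_samples base_sentences target_length target_count) := by unfold Pre_get_sentence_length_samples; infer_instance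

def pvWitness_get_sentence_length_samples : List String × Int × Int := (["a b c", "d", "e f"], 1, 1)

def Spec_get_sentence_length_samples (base_sentences : List String) (target_length : Int) (target_count : Int) (out : List String × List String) : Prop := out = get_sentence_length_samples_alt base_sentences target_length target_count
instance (base_sentences : List String) (target_length : Int) (target_count : Int) (out : List String × List String) : Decidable (Spec_get_sentence_length_samples base_sentences target_length target_count out) := by unfold Spec_get_sentence_length_samples; infer_instance

-- ===== CLAIM (what is proved, stated in full; the proofs are below) =====
def Claim_equal_get_sentence_length_samples : Prop := ∀ (base_sentences : List String) (target_length : Int) (target_count : Int), Dom_get_sentence_length_samples base_sentences target_length target_count → Pre_get_sentence_length_samples base_sentences target_length target_count → Spec_get_sentence_length_samples base_sentences target_length target_count (get_sentence_length_samples base_sentences target_length target_count)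

-- ===== LEMMAS AND PROOFS =====

-- The first target_count elements of each accumulator are unaffected by the break:
-- taking tc of the loop's result equals taking tc of "accumulator ++ full filter".
-- take n of "prefix ++ one element ++ anything" ignores the tail once the prefix ++ element reaches n
theorem pv_take_append_cons {α : Type} (n : Nat) (l : List α) (a : α) (m : List α)
    (h : n ≤ (l ++ [a]).length) : (l ++ a :: m).take n = (l ++ [a]).take n := by
  rw [List.append_cons, List.take_append_of_le_length h]

-- The first target_count elements of each accumulator are unaffected by A's break:
-- taking target_count of the loop's result equals taking it of "accumulator ++ full filter".
theorem pvLoopA_take (target_length target_count : Int) :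
    ∀ (bs neg pos : List String),
      (pvLoopA target_length target_count bs neg pos).1.take target_count.toNat
        = (neg ++ bs.filter (fun s => decide (target_length < ((PySem.Str.split₀ s).length : Int)))).take target_count.toNat
      ∧ (pvLoopA target_length target_count bs neg pos).2.take target_count.toNat
        = (pos ++ bs.filter (fun s => decide (((PySem.Str.split₀ s).length : Int) ≤ target_length))).take target_count.toNat := by
  intro bs
  induction bs with
  | nil => intro neg pos; simp [pvLoopA]
  | cons s rest ih =>
    intro neg pos
    by_cases hp : ((PySem.Str.split₀ s).length : Int) ≤ target_length
    · simp only [pvLoopA, if_pos hp]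
      rw [List.filter_cons_of_pos (p := fun s => decide (((PySem.Str.split₀ s).length : Int) ≤ target_length)) (by simp [hp]),
          List.filter_cons_of_neg (p := fun s => decide (target_length < ((PySem.Str.split₀ s).length : Int))) (by simp [hp])]
      by_cases hb : target_count ≤ ((neg : List String).length : Int) ∧ target_count ≤ (((pos ++ [s]) : List String).length : Int)
      · rw [if_pos hb]
        have h1 : target_count.toNat ≤ neg.length := by omega
        have h2 : target_count.toNat ≤ (pos ++ [s]).length := by
          have := hb.2; simp at this ⊢; omega
        refine ⟨?_, ?_⟩
        · show List.take _ neg = _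
          rw [List.take_append_of_le_length h1]
        · show List.take _ (pos ++ [s]) = _
          rw [pv_take_append_cons target_count.toNat pos s
              (List.filter (fun s => decide (((PySem.Str.split₀ s).length : Int) ≤ target_length)) rest) h2]
      · rw [if_neg hb]
        rcases ih neg (pos ++ [s]) with ⟨e1, e2⟩
        refine ⟨e1, ?_⟩
        rw [e2, ← List.append_cons]
    · simp only [pvLoopA, if_neg hp]
      rw [List.filter_cons_of_neg (p := fun s => decide (((PySem.Str.split₀ s).length : Int) ≤ target_length)) (by simp [hp]),
          List.filter_cons_of_pos (p := fun s => decide (target_length < ((PySem.Str.split₀ s).length : Int))) (by simp [not_le.mp hp])]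
      by_cases hb : target_count ≤ (((neg ++ [s]) : List String).length : Int) ∧ target_count ≤ ((pos : List String).length : Int)
      · rw [if_pos hb]
        have h1 : target_count.toNat ≤ (neg ++ [s]).length := by
          have := hb.1; simp at this ⊢; omega
        have h2 : target_count.toNat ≤ pos.length := by
          have := hb.2; omega
        refine ⟨?_, ?_⟩
        · show List.take _ (neg ++ [s]) = _
          rw [pv_take_append_cons target_count.toNat neg s
              (List.filter (fun s => decide (target_length < ((PySem.Str.split₀ s).length : Int))) rest) h1]
        · show List.take _ pos = _
          rw [List.take_append_of_le_length h2]
      · rw [if_neg hb]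
        rcases ih (neg ++ [s]) pos with ⟨e1, e2⟩
        refine ⟨?_, e2⟩
        rw [e1, ← List.append_cons]

-- ===== VERDICT (by name: the statement is the Claim_ definition above) =====
theorem get_sentence_length_samples_spec : Claim_equal_get_sentence_length_samples := by
  intro bs tl tc _hdom hpre
  unfold Spec_get_sentence_length_samples
  unfold get_sentence_length_samples get_sentence_length_samples_alt
  have hpre' : (0:Int) ≤ tc := hpre
  rcases pvLoopA_take tl tc bs [] [] with ⟨e1, e2⟩
  simp [PySem.List.slice_to _ hpre', e1, e2]
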